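-- pv_equiv track=rewrite | github.com/yugeshk/klee | scripts/contract-tree/build_tree.py | check_for_clarity
-- ===== SOURCE A (Python) =====
-- def check_for_clarity(formula_var):
--     if(len(formula_var) == 0):
--         return False
--
--     pcvs_used = {}
--     for formula in formula_var:
--         pcvs_used[formula] = list()
--         formula_terms = formula.split("+")
--         for term in formula_terms:
--             term = term.strip()
--             if("*" in term):
--                 pcvs = term.replace("*", "")
--             else:
--                 pcvs = ""
--             pcvs_used[formula].append(pcvs)
--     expected_pcv_set = set(pcvs_used[list(formula_var)[0]])
--     return all(set(pcv_list) == expected_pcv_set for pcv_list in pcvs_used.values())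
-- ===== SOURCE B (Python) =====
-- def check_for_clarity(formula_var):
--     if not formula_var:
--         return False
--
--     def tokens(formula):
--         out = []
--         for term in formula.split("+"):
--             t = term.strip()
--             out.append(t.replace("*", "") if "*" in t else "")
--         return out
--
--     def included(xs, ys):
--         return all(x in ys for x in xs)
--
--     prev = tokens(formula_var[0])
--     for f in formula_var[1:]:
--         cur = tokens(f)
--         if not (included(prev, cur) and included(cur, prev)):
--             return False
--         prev = cur
--     return True
-- ===== Notes on version B (the rewrite author's own statement) =====
-- stated objective: alternative
-- what changed: Replaces A's dict of per-formula token lists compared as hash sets against the first formula's set with a chain scan that compares only ADJACENT formulas' raw token lists via two-sided list inclusion (no dict, no set objects, no fixed reference element), relying on transitivity of set equality.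
import Mathlib
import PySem

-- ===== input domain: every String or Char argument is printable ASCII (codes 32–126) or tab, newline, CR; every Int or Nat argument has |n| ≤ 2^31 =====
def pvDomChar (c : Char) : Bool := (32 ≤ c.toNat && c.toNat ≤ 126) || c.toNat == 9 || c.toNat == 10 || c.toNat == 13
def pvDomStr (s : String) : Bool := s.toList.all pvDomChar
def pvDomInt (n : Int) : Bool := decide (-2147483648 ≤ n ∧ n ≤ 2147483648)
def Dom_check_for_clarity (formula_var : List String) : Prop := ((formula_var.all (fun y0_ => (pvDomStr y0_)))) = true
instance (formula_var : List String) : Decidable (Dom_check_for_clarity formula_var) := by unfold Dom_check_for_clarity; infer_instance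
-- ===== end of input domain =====

-- B replaces A's dict of per-formula token lists compared as sets to the first formula's set with a chain scan comparing only adjacent formulas' token lists by two-sided list inclusion (alternative decomposition; no dict, no sets, no fixed reference).


-- ===== PORT A =====
-- term.strip(); then term.replace("*","") if "*" in term else ""
def pvTokA (term : String) : String :=
  let term := PySem.Str.strip term
  if PySem.Str.isIn "*" term then PySem.Str.replace term "*" "" else ""

-- one iteration of A's outer loop: pcvs_used[formula] = list(); then append pvTokA of each term
def pvBodyA (d : PySem.Dict String (List String)) (formula : String) :
    PySem.Dict String (List String) :=
  let d := d.insert formula []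
  ((PySem.Str.split? formula "+").getD []).foldl
    (fun d term => d.insert formula (d.getD formula [] ++ [pvTokA term])) d

def check_for_clarity (formula_var : List String) : Bool :=
  if formula_var.length = 0 then false
  else
    let pcvs_used := formula_var.foldl pvBodyA PySem.Dict.empty
    let expected := PySem.Set.ofList (pcvs_used.getD ((PySem.List.pyGet? formula_var 0).getD "") [])
    pcvs_used.values.all (fun pcv_list => PySem.Set.equal (PySem.Set.ofList pcv_list) expected)

-- ===== PORT B =====
-- tokens(formula): the raw token list (no set, duplicates kept)
def pvToksB (f : String) : List String :=
  ((PySem.Str.split? f "+").getD []).map (fun term =>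
    let t := PySem.Str.strip term
    if PySem.Str.isIn "*" t then PySem.Str.replace t "*" "" else "")

-- included(xs, ys): all(x in ys for x in xs)
def pvIncl (xs ys : List String) : Bool := xs.all (fun x => ys.contains x)

-- the loop over formula_var[1:] carrying prev, with early return False
def pvChain : List String → List String → Bool
  | _, [] => true
  | prev, f :: fs =>
    let cur := pvToksB f
    if pvIncl prev cur && pvIncl cur prev then pvChain cur fs else false

def check_for_clarity_alt (formula_var : List String) : Bool :=
  match formula_var with
  | [] => false
  | hd :: tl => pvChain (pvToksB hd) tl

-- ===== PRECONDITION & SPEC =====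
def Spec_check_for_clarity (formula_var : List String) (out : Bool) : Prop := out = check_for_clarity_alt formula_var
instance (formula_var : List String) (out : Bool) : Decidable (Spec_check_for_clarity formula_var out) := by unfold Spec_check_for_clarity; infer_instance

-- ===== CLAIM (what is proved, stated in full; the proofs are below) =====
def Claim_equal_check_for_clarity : Prop := ∀ (formula_var : List String), Dom_check_for_clarity formula_var → Spec_check_for_clarity formula_var (check_for_clarity formula_var)

-- ===== LEMMAS AND PROOFS =====
-- the token list A accumulates for one formula
def pvTermsA (f : String) : List String := ((PySem.Str.split? f "+").getD []).map pvTokA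
-- the set of tokens of a formula
def pvSA (f : String) : PySem.Set String := PySem.Set.ofList (pvTermsA f)

theorem pvToksB_eq (f : String) : pvToksB f = pvTermsA f := rfl

theorem pvInner_getD (l : List String) (d : PySem.Dict String (List String)) (g k : String) :
    ((l.foldl (fun d term => d.insert g (d.getD g [] ++ [pvTokA term])) d).getD k []) =
      if k = g then d.getD g [] ++ l.map pvTokA else d.getD k [] := by
  induction l generalizing d with
  | nil => by_cases h : k = g <;> simp [h]
  | cons x xs ih =>
      simp only [List.foldl_cons, List.map_cons, ih]
      by_cases h : k = g
      · simp [h, PySem.Dict.getD_insert_self]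
      · simp [h, PySem.Dict.getD_insert_of_ne _ _ _ h]

theorem pvBodyA_getD (d : PySem.Dict String (List String)) (g k : String) :
    (pvBodyA d g).getD k [] = if k = g then pvTermsA g else d.getD k [] := by
  unfold pvBodyA
  rw [pvInner_getD]
  by_cases h : k = g
  · simp [h, pvTermsA, PySem.Dict.getD_insert_self]
  · simp [h, PySem.Dict.getD_insert_of_ne _ _ _ h]

theorem pvInner_keys (l : List String) (d : PySem.Dict String (List String)) (g : String)
    (h : d.contains g = true) :
    ((l.foldl (fun d term => d.insert g (d.getD g [] ++ [pvTokA term])) d).keys) = d.keys := by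
  induction l generalizing d with
  | nil => rfl
  | cons x xs ih =>
      simp only [List.foldl_cons]
      rw [ih _ (by simp [PySem.Dict.contains_insert_self]),
        PySem.Dict.keys_insert_of_contains _ _ h]

theorem pvBodyA_keys (d : PySem.Dict String (List String)) (g : String) :
    (pvBodyA d g).keys = PySem.Set.add d.keys g := by
  unfold pvBodyA
  rw [pvInner_keys _ _ _ (by simp [PySem.Dict.contains_insert_self])]
  by_cases h : d.contains g = true
  · rw [PySem.Dict.keys_insert_of_contains _ _ h,
      PySem.Set.add_of_mem ((PySem.Dict.contains_iff_mem_keys _ _).mp h)]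
  · have h' : d.contains g = false := by revert h; cases d.contains g <;> simp
    rw [PySem.Dict.keys_insert_of_not_contains _ _ h',
      PySem.Set.add_of_not_mem]
    intro hm
    exact h ((PySem.Dict.contains_iff_mem_keys _ _).mpr hm)

theorem pvFoldA_keys (l : List String) (d : PySem.Dict String (List String)) :
    (l.foldl pvBodyA d).keys = PySem.Set.update d.keys l := by
  induction l generalizing d with
  | nil => rfl
  | cons x xs ih =>
      rw [List.foldl_cons, ih, pvBodyA_keys, PySem.Set.update_cons]

theorem pvFoldA_getD (l : List String) (d : PySem.Dict String (List String)) (k : String) :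
    (l.foldl pvBodyA d).getD k [] = if k ∈ l then pvTermsA k else d.getD k [] := by
  induction l generalizing d with
  | nil => simp
  | cons x xs ih =>
      rw [List.foldl_cons, ih, pvBodyA_getD]
      by_cases hl : k ∈ xs
      · simp [hl]
      · by_cases hx : k = x <;> simp [hl, hx]

-- "same token set" as a proposition
def pvSame (f g : String) : Prop := ∀ a, a ∈ pvTermsA f ↔ a ∈ pvTermsA g

theorem pvEqual_iff (f g : String) :
    PySem.Set.equal (pvSA f) (pvSA g) = true ↔ pvSame f g := by
  rw [PySem.Set.equal_iff]
  unfold pvSA pvSame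
  constructor
  · intro h a
    have := h a
    simpa [PySem.Set.mem_ofList] using this
  · intro h a
    simpa [PySem.Set.mem_ofList] using h a

theorem pvIncl_pair_iff (f g : String) :
    (pvIncl (pvToksB f) (pvToksB g) && pvIncl (pvToksB g) (pvToksB f)) = true ↔ pvSame f g := by
  simp only [pvIncl, pvToksB_eq, Bool.and_eq_true, List.all_eq_true, List.contains_eq_mem,
    decide_eq_true_eq, pvSame]
  constructor
  · rintro ⟨h1, h2⟩ a
    exact ⟨fun ha => h1 a ha, fun ha => h2 a ha⟩
  · intro h
    exact ⟨fun a ha => (h a).mp ha, fun a ha => (h a).mpr ha⟩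

theorem pvChain_iff (l : List String) (p : String) :
    pvChain (pvToksB p) l = true ↔ ∀ f ∈ l, pvSame f p := by
  induction l generalizing p with
  | nil => simp [pvChain]
  | cons f fs ih =>
      show (if pvIncl (pvToksB p) (pvToksB f) && pvIncl (pvToksB f) (pvToksB p) then
          pvChain (pvToksB f) fs else false) = true ↔ _
      by_cases hpf : (pvIncl (pvToksB p) (pvToksB f) && pvIncl (pvToksB f) (pvToksB p)) = true
      · have hsame : pvSame f p := by
          have := (pvIncl_pair_iff p f).mp hpf
          intro a; exact (this a).symm
        rw [if_pos hpf, ih]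
        constructor
        · intro h g hg
          rcases List.mem_cons.mp hg with h1 | h2
          · exact h1 ▸ hsame
          · intro a; exact ((h g h2) a).trans (hsame a)
        · intro h g hg
          intro a
          exact ((h g (List.mem_cons_of_mem _ hg)) a).trans ((hsame a).symm)
      · rw [if_neg hpf]
        apply iff_of_false (by simp)
        intro h
        exact hpf ((pvIncl_pair_iff p f).mpr
          (fun a => ((h f (by simp)) a).symm))

theorem pvA_iff (hd : String) (tl : List String) :
    check_for_clarity (hd :: tl) = true ↔ ∀ f ∈ tl, pvSame f hd := by
  unfold check_for_clarity
  simp only [List.length_cons, Nat.succ_ne_zero, if_false]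
  have hkeys : ((hd :: tl).foldl pvBodyA PySem.Dict.empty).keys =
      PySem.Set.ofList (hd :: tl) := by
    rw [pvFoldA_keys]; rfl
  have hnd : (((hd :: tl).foldl pvBodyA PySem.Dict.empty).keys).Nodup := by
    rw [hkeys]; exact PySem.Set.nodup_ofList _
  have hget0 : (PySem.List.pyGet? (hd :: tl) 0).getD "" = hd := by
    simp [PySem.List.pyGet?, PySem.List.pyIdx?]
  rw [hget0, PySem.Dict.values_eq_map_keys _ hnd [], hkeys]
  rw [pvFoldA_getD]
  simp only [List.mem_cons, true_or, if_true]
  have hmapc : (PySem.Set.ofList (hd :: tl)).map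
        (fun k => ((hd :: tl).foldl pvBodyA PySem.Dict.empty).getD k []) =
      (PySem.Set.ofList (hd :: tl)).map pvTermsA := by
    apply List.map_congr_left
    intro k hk
    rw [pvFoldA_getD, if_pos ((PySem.Set.mem_ofList _ _).mp hk)]
  rw [hmapc, List.all_map]
  simp only [List.all_eq_true, Function.comp]
  constructor
  · intro h f hf
    exact (pvEqual_iff f hd).mp
      (h f ((PySem.Set.mem_ofList _ _).mpr (List.mem_cons_of_mem _ hf)))
  · intro h k hk
    rcases List.mem_cons.mp ((PySem.Set.mem_ofList _ _).mp hk) with h1 | h2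
    · subst h1; exact (pvEqual_iff k k).mpr (fun a => Iff.rfl)
    · exact (pvEqual_iff _ _).mpr (h k h2)

-- ===== VERDICT (by name: the statement is the Claim_ definition above) =====
theorem check_for_clarity_spec : Claim_equal_check_for_clarity := by
  intro formula_var _
  unfold Spec_check_for_clarity
  cases formula_var with
  | nil => decide
  | cons hd tl =>
      have hA := pvA_iff hd tl
      have hB := pvChain_iff tl hd
      show check_for_clarity (hd :: tl) = pvChain (pvToksB hd) tl
      rw [Bool.eq_iff_iff, hA, hB]
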